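-- pv_equiv track=rewrite | github.com/alvii147/gitmsg | MangoUI/docs/DocsGenerator.py | addHyperlinks
-- ===== SOURCE A (Python) =====
-- def addHyperlinks(doc):
--     links = {
--         'QColor': 'https://doc.qt.io/qtforpython-5/PySide2/QtGui/QColor.html',
--         'QPushButton': 'https://doc.qt.io/qtforpython-5/PySide2/QtWidgets/QPushButton.html',
--         'QSS': 'https://doc.qt.io/qt-5/stylesheet-syntax.html',
--         'QVariantAnimation': 'https://doc.qt.io/qtforpython-5/PySide2/QtCore/QVariantAnimation.html',
--         'QLabel': 'https://doc.qt.io/qtforpython-5/PySide2/QtWidgets/QLabel.html',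
--         'QPixmap': 'https://doc.qt.io/qtforpython/PySide6/QtGui/QPixmap.html',
--         'QPainter': 'https://doc.qt.io/qtforpython-5/PySide2/QtGui/QPainter.html',
--         'QStackedWidget': 'https://doc.qt.io/archives/qtforpython-5.12/PySide2/QtWidgets/QStackedWidget.html',
--         'Qt.Orientation': 'https://doc.qt.io/qtforpython/PySide6/QtCore/Qt.html#PySide6.QtCore.PySide6.QtCore.Qt.Orientation',
--         'QEasingCurve.Type': 'https://doc.qt.io/qtforpython/PySide6/QtCore/QEasingCurve.html#PySide6.QtCore.PySide6.QtCore.QEasingCurve.Type',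
--         'QLayout': 'https://doc.qt.io/qtforpython-5/PySide2/QtWidgets/QLayout.html',
--         'QWidget': 'https://doc.qt.io/qtforpython-5/PySide2/QtWidgets/QWidget.html',
--     }
--
--     linked_doc = doc
--     md_links = {k:f'[{k}]({v})' for (k, v) in links.items()}
--     for (k, v) in md_links.items():
--         linked_doc = linked_doc.replace(k, v)
--
--     return linked_doc
-- ===== SOURCE B (Python) =====
-- def addHyperlinks(doc):
--     LINKS = [
--         ('QColor', 'https://doc.qt.io/qtforpython-5/PySide2/QtGui/QColor.html'),
--         ('QPushButton', 'https://doc.qt.io/qtforpython-5/PySide2/QtWidgets/QPushButton.html'),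
--         ('QSS', 'https://doc.qt.io/qt-5/stylesheet-syntax.html'),
--         ('QVariantAnimation', 'https://doc.qt.io/qtforpython-5/PySide2/QtCore/QVariantAnimation.html'),
--         ('QLabel', 'https://doc.qt.io/qtforpython-5/PySide2/QtWidgets/QLabel.html'),
--         ('QPixmap', 'https://doc.qt.io/qtforpython/PySide6/QtGui/QPixmap.html'),
--         ('QPainter', 'https://doc.qt.io/qtforpython-5/PySide2/QtGui/QPainter.html'),
--         ('QStackedWidget', 'https://doc.qt.io/archives/qtforpython-5.12/PySide2/QtWidgets/QStackedWidget.html'),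
--         ('Qt.Orientation', 'https://doc.qt.io/qtforpython/PySide6/QtCore/Qt.html#PySide6.QtCore.PySide6.QtCore.Qt.Orientation'),
--         ('QEasingCurve.Type', 'https://doc.qt.io/qtforpython/PySide6/QtCore/QEasingCurve.html#PySide6.QtCore.PySide6.QtCore.QEasingCurve.Type'),
--         ('QLayout', 'https://doc.qt.io/qtforpython-5/PySide2/QtWidgets/QLayout.html'),
--         ('QWidget', 'https://doc.qt.io/qtforpython-5/PySide2/QtWidgets/QWidget.html'),
--     ]
--     # (class name, markdown link) lookup table, built once
--     table = [(name, '[' + name + '](' + url + ')') for name, url in LINKS]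
--     # single left-to-right scan: at each position link the first matching class
--     # name, otherwise copy the character
--     out = []
--     i = 0
--     n = len(doc)
--     while i < n:
--         for name, md in table:
--             if doc.startswith(name, i):
--                 out.append(md)
--                 i += len(name)
--                 break
--         else:
--             out.append(doc[i])
--             i += 1
--     return ''.join(out)
-- ===== Notes on version B (the rewrite author's own statement) =====
-- stated objective: alternative
-- what changed: Replaces the twelve sequential str.replace passes (each rebuilding the whole string) by one left-to-right scan over the document driven by a precomputed (name, markdown-link) table: at each position the first matching class name is replaced and the scan resumes after it, otherwise the character is copied.
import Mathlib
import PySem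

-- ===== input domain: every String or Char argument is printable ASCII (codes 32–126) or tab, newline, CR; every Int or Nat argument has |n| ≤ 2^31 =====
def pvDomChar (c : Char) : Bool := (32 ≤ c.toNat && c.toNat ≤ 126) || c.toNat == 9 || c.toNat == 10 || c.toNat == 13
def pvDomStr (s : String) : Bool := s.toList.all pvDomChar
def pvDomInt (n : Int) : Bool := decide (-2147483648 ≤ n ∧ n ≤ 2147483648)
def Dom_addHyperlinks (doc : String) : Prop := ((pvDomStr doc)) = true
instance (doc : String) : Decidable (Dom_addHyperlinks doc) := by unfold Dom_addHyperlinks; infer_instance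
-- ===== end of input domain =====

-- B replaces A's twelve sequential str.replace passes by one left-to-right scan driven by a
-- precomputed (name, markdown) table; same return value, no speed claim.

-- ===== PORT A =====
-- A's `links` dict (insertion order), keys and URLs as code-point lists
def pvALinks : List (List Char × List Char) := [
  ("QColor".toList, "https://doc.qt.io/qtforpython-5/PySide2/QtGui/QColor.html".toList),
  ("QPushButton".toList, "https://doc.qt.io/qtforpython-5/PySide2/QtWidgets/QPushButton.html".toList),
  ("QSS".toList, "https://doc.qt.io/qt-5/stylesheet-syntax.html".toList),
  ("QVariantAnimation".toList, "https://doc.qt.io/qtforpython-5/PySide2/QtCore/QVariantAnimation.html".toList),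
  ("QLabel".toList, "https://doc.qt.io/qtforpython-5/PySide2/QtWidgets/QLabel.html".toList),
  ("QPixmap".toList, "https://doc.qt.io/qtforpython/PySide6/QtGui/QPixmap.html".toList),
  ("QPainter".toList, "https://doc.qt.io/qtforpython-5/PySide2/QtGui/QPainter.html".toList),
  ("QStackedWidget".toList, "https://doc.qt.io/archives/qtforpython-5.12/PySide2/QtWidgets/QStackedWidget.html".toList),
  ("Qt.Orientation".toList, "https://doc.qt.io/qtforpython/PySide6/QtCore/Qt.html#PySide6.QtCore.PySide6.QtCore.Qt.Orientation".toList),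
  ("QEasingCurve.Type".toList, "https://doc.qt.io/qtforpython/PySide6/QtCore/QEasingCurve.html#PySide6.QtCore.PySide6.QtCore.QEasingCurve.Type".toList),
  ("QLayout".toList, "https://doc.qt.io/qtforpython-5/PySide2/QtWidgets/QLayout.html".toList),
  ("QWidget".toList, "https://doc.qt.io/qtforpython-5/PySide2/QtWidgets/QWidget.html".toList)]

-- A: md_links = {k: f'[{k}]({v})' for (k, v) in links.items()}, then chain
-- linked_doc = linked_doc.replace(k, md) over md_links.items()
def addHyperlinks (doc : String) : String :=
  let mdLinks : List (List Char × List Char) :=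
    pvALinks.map (fun kv => (kv.1, "[".toList ++ kv.1 ++ "](".toList ++ kv.2 ++ ")".toList))
  String.ofList (mdLinks.foldl (fun acc kv => PySem.Chars.replace acc kv.1 kv.2) doc.toList)

-- ===== PORT B =====
-- B's LINKS list of (class name, url) pairs, in order
def pvBLinks : List (List Char × List Char) := [
  ("QColor".toList, "https://doc.qt.io/qtforpython-5/PySide2/QtGui/QColor.html".toList),
  ("QPushButton".toList, "https://doc.qt.io/qtforpython-5/PySide2/QtWidgets/QPushButton.html".toList),
  ("QSS".toList, "https://doc.qt.io/qt-5/stylesheet-syntax.html".toList),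
  ("QVariantAnimation".toList, "https://doc.qt.io/qtforpython-5/PySide2/QtCore/QVariantAnimation.html".toList),
  ("QLabel".toList, "https://doc.qt.io/qtforpython-5/PySide2/QtWidgets/QLabel.html".toList),
  ("QPixmap".toList, "https://doc.qt.io/qtforpython/PySide6/QtGui/QPixmap.html".toList),
  ("QPainter".toList, "https://doc.qt.io/qtforpython-5/PySide2/QtGui/QPainter.html".toList),
  ("QStackedWidget".toList, "https://doc.qt.io/archives/qtforpython-5.12/PySide2/QtWidgets/QStackedWidget.html".toList),
  ("Qt.Orientation".toList, "https://doc.qt.io/qtforpython/PySide6/QtCore/Qt.html#PySide6.QtCore.PySide6.QtCore.Qt.Orientation".toList),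
  ("QEasingCurve.Type".toList, "https://doc.qt.io/qtforpython/PySide6/QtCore/QEasingCurve.html#PySide6.QtCore.PySide6.QtCore.QEasingCurve.Type".toList),
  ("QLayout".toList, "https://doc.qt.io/qtforpython-5/PySide2/QtWidgets/QLayout.html".toList),
  ("QWidget".toList, "https://doc.qt.io/qtforpython-5/PySide2/QtWidgets/QWidget.html".toList)]

-- table = [(name, '[' + name + '](' + url + ')') for name, url in LINKS]
def pvBTable : List (List Char × List Char) :=
  pvBLinks.map (fun nu => (nu.1, '[' :: (nu.1 ++ (']' :: '(' :: (nu.2 ++ [')'])))))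

-- B's while loop with the for/else over table: at each position the first matching
-- name is emitted as its markdown (find? = the for's first match) and the scan
-- resumes after it; otherwise the character is copied
def pvBScan (tbl : List (List Char × List Char)) : List Char → List Char
  | [] => []
  | c :: t =>
    match tbl.find? (fun km => km.1.isPrefixOf (c :: t)) with
    | some km => km.2 ++ pvBScan tbl (t.drop (km.1.length - 1))
    | none => c :: pvBScan tbl t
termination_by l => l.length
decreasing_by all_goals (simp only [List.length_cons, List.length_drop]; omega)

def addHyperlinks_alt (doc : String) : String :=
  String.ofList (pvBScan pvBTable doc.toList)

-- ===== PRECONDITION & SPEC =====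
def Spec_addHyperlinks (doc : String) (out : String) : Prop := out = addHyperlinks_alt doc
instance (doc : String) (out : String) : Decidable (Spec_addHyperlinks doc out) := by unfold Spec_addHyperlinks; infer_instance

-- ===== CLAIM (what is proved, stated in full; the proofs are below) =====
def Claim_equal_addHyperlinks : Prop := ∀ (doc : String), Dom_addHyperlinks doc → Spec_addHyperlinks doc (addHyperlinks doc)

-- ===== LEMMAS AND PROOFS =====

-- proof-side model of Python's str.replace (old nonempty): one scan with replacement
def pvRep (old new : List Char) : List Char → List Char
  | [] => []
  | c :: t =>
    if old.isPrefixOf (c :: t) then new ++ pvRep old new (t.drop (old.length - 1))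
    else c :: pvRep old new t
termination_by l => l.length
decreasing_by all_goals (simp only [List.length_cons, List.length_drop]; omega)

-- key shape used by the equivalence: nonempty, starts with 'Q', no 'Q' after the
-- first character, contains neither ')' nor '['
def pvGoodKey (k : List Char) : Bool :=
  !k.isEmpty && (k.head? == some 'Q') && (k.drop 1).all (fun c => c ≠ 'Q')
    && k.all (fun c => c ≠ ')' && c ≠ '[')

-- table invariant: every key is good, every markdown starts '[' and ends ')',
-- and no later key occurs inside an earlier markdown
def pvGood : List (List Char × List Char) → Bool
  | [] => true
  | km :: rest =>
      pvGoodKey km.1 && (km.2.head? == some '[') && (km.2.getLast? == some ')')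
        && rest.all (fun kw => !(PySem.Chars.isIn kw.1 km.2)) && pvGood rest

lemma pvGood_mem_key {tbl : List (List Char × List Char)} {km : List Char × List Char}
    (h : pvGood tbl = true) (hm : km ∈ tbl) : pvGoodKey km.1 = true := by
  induction tbl with
  | nil => cases hm
  | cons a rest ih =>
    simp only [pvGood, Bool.and_eq_true] at h
    rcases List.mem_cons.mp hm with h' | h'
    · subst h'; exact h.1.1.1.1
    · exact ih h.2 h'

lemma pvGoodKey_parts {k : List Char} (h : pvGoodKey k = true) :
    k ≠ [] ∧ k.head? = some 'Q' ∧ (∀ c ∈ k.drop 1, c ≠ 'Q') ∧ (∀ c ∈ k, c ≠ ')' ∧ c ≠ '[') := by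
  simp only [pvGoodKey, Bool.and_eq_true, Bool.not_eq_true', List.isEmpty_eq_false_iff,
    beq_iff_eq, List.all_eq_true, decide_eq_true_eq] at h
  exact ⟨h.1.1.1, h.1.1.2, h.1.2, fun c hc => h.2 c hc⟩

lemma pvGoodKey_ne_nil {k : List Char} (h : pvGoodKey k = true) : k ≠ [] :=
  (pvGoodKey_parts h).1

lemma pvGoodKey_headQ {k : List Char} (h : pvGoodKey k = true) : k.head? = some 'Q' :=
  (pvGoodKey_parts h).2.1

lemma pvGoodKey_noQ {k : List Char} (h : pvGoodKey k = true) :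
    ∀ i, 1 ≤ i → i < k.length → k[i]? ≠ some 'Q' := by
  intro i h1 hi hQ
  have hmem : 'Q' ∈ k.drop 1 := by
    apply List.mem_of_getElem? (i := i - 1)
    rw [List.getElem?_drop]
    rwa [Nat.add_sub_cancel' h1]
  exact (pvGoodKey_parts h).2.2.1 'Q' hmem rfl

lemma pvGoodKey_noParen {k : List Char} (h : pvGoodKey k = true) : ')' ∉ k :=
  fun hc => ((pvGoodKey_parts h).2.2.2 ')' hc).1 rfl

lemma pvGoodKey_noBracket {k : List Char} (h : pvGoodKey k = true) : '[' ∉ k :=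
  fun hc => ((pvGoodKey_parts h).2.2.2 '[' hc).2 rfl

-- unfolding lemmas for PySem's replace loop and for pvRep / pvBScan
lemma pvGo_zero (old new l acc : List Char) :
    PySem.Chars.replace.go old new 0 l acc = acc.reverse ++ l := by
  rw [PySem.Chars.replace.go]

lemma pvGo_nil (old new acc : List Char) (n : Nat) :
    PySem.Chars.replace.go old new (n + 1) [] acc = acc.reverse := by
  rw [PySem.Chars.replace.go]
  simp

lemma pvGo_cons (old new : List Char) (n : Nat) (c : Char) (t acc : List Char) :
    PySem.Chars.replace.go old new (n + 1) (c :: t) acc =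
      (if old.isPrefixOf (c :: t) then
        PySem.Chars.replace.go old new n (List.drop old.length (c :: t)) (new.reverse ++ acc)
      else PySem.Chars.replace.go old new n t (c :: acc)) := by
  rw [PySem.Chars.replace.go]

lemma pvRep_nil (old new : List Char) : pvRep old new [] = [] := by
  rw [pvRep]

lemma pvRep_cons (old new : List Char) (c : Char) (t : List Char) :
    pvRep old new (c :: t) =
      (if old.isPrefixOf (c :: t) then new ++ pvRep old new (t.drop (old.length - 1))
       else c :: pvRep old new t) := by
  rw [pvRep]

lemma pvBScan_nil' (tbl : List (List Char × List Char)) : pvBScan tbl [] = [] := by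
  rw [pvBScan]

lemma pvBScan_cons_some {tbl : List (List Char × List Char)} {c : Char} {t : List Char}
    {kw : List Char × List Char}
    (h : tbl.find? (fun km => km.1.isPrefixOf (c :: t)) = some kw) :
    pvBScan tbl (c :: t) = kw.2 ++ pvBScan tbl (t.drop (kw.1.length - 1)) := by
  rw [pvBScan, h]

lemma pvBScan_cons_none {tbl : List (List Char × List Char)} {c : Char} {t : List Char}
    (h : tbl.find? (fun km => km.1.isPrefixOf (c :: t)) = none) :
    pvBScan tbl (c :: t) = c :: pvBScan tbl t := by
  rw [pvBScan, h]

-- PySem's replace loop equals pvRep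
lemma pvRep_go (old new : List Char) (hne : old ≠ []) :
    ∀ (fuel : Nat) (l acc : List Char), l.length ≤ fuel →
      PySem.Chars.replace.go old new fuel l acc = acc.reverse ++ pvRep old new l := by
  intro fuel
  induction fuel with
  | zero =>
    intro l acc hl
    have h0 : l = [] := List.eq_nil_of_length_eq_zero (Nat.le_zero.mp hl)
    subst h0
    rw [pvGo_zero, pvRep_nil]
  | succ n ih =>
    intro l acc hl
    cases l with
    | nil => rw [pvGo_nil, pvRep_nil, List.append_nil]
    | cons c t =>
      obtain ⟨o, os, rfl⟩ : ∃ o os, old = o :: os := by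
        cases old with
        | nil => exact absurd rfl hne
        | cons o os => exact ⟨o, os, rfl⟩
      rw [pvGo_cons, pvRep_cons]
      by_cases hp : (o :: os).isPrefixOf (c :: t)
      · rw [if_pos hp, if_pos hp]
        have hlen : (List.drop (o :: os).length (c :: t)).length ≤ n := by
          simp only [List.length_cons, List.length_drop] at *
          omega
        rw [ih _ _ hlen]
        simp [List.drop_succ_cons]
      · rw [if_neg hp, if_neg hp]
        have hlen : t.length ≤ n := by simp at hl; omega
        rw [ih _ _ hlen]
        simp

lemma pvRep_eq (s old new : List Char) (hne : old ≠ []) :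
    PySem.Chars.replace s old new = pvRep old new s := by
  unfold PySem.Chars.replace
  rw [if_neg (by simpa using hne)]
  simpa using pvRep_go old new hne s.length s [] le_rfl

lemma pvBScan_nil (l : List Char) : pvBScan [] l = l := by
  induction l with
  | nil => exact pvBScan_nil' []
  | cons c t ih => rw [pvBScan_cons_none (by simp), ih]

-- skip a prefix in which no key matches (scan side)
lemma pvBScan_skip (tbl : List (List Char × List Char)) :
    ∀ (u t : List Char), (∀ p, p < u.length → ∀ km ∈ tbl, ¬ km.1 <+: (u.drop p ++ t)) →
      pvBScan tbl (u ++ t) = u ++ pvBScan tbl t := by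
  intro u
  induction u with
  | nil => intro t _; simp
  | cons a u' ih =>
    intro t h
    have hnone : tbl.find? (fun km => km.1.isPrefixOf (a :: (u' ++ t))) = none := by
      apply List.find?_eq_none.mpr
      intro km hkm
      simp only [List.isPrefixOf_iff_prefix]
      exact h 0 (by simp) km hkm
    rw [List.cons_append, pvBScan_cons_none hnone,
      ih t (fun p hp km hkm => by
        have := h (p + 1) (by simp; omega) km hkm
        simpa using this)]
    simp

-- skip a prefix in which old does not match (replace side)
lemma pvRep_skip (old new : List Char) :
    ∀ (u t : List Char), (∀ p, p < u.length → ¬ old <+: (u.drop p ++ t)) →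
      pvRep old new (u ++ t) = u ++ pvRep old new t := by
  intro u
  induction u with
  | nil => intro t _; simp
  | cons a u' ih =>
    intro t h
    rw [List.cons_append, pvRep_cons,
      if_neg (by simp only [List.isPrefixOf_iff_prefix]; exact h 0 (by simp)),
      ih t (fun p hp => by
        have := h (p + 1) (by simp; omega)
        simpa using this)]
    simp

-- a replacement starting with '[' creates no new '['-free prefix
lemma pvRep_prefix (old new : List Char) (hh : new.head? = some '[') :
    ∀ (s w : List Char), w <+: pvRep old new s → w <+: s ∨ '[' ∈ w := by
  have H : ∀ (n : Nat) (s w : List Char), s.length ≤ n →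
      w <+: pvRep old new s → w <+: s ∨ '[' ∈ w := by
    intro n
    induction n with
    | zero =>
      intro s w hs hw
      have h0 : s = [] := List.eq_nil_of_length_eq_zero (Nat.le_zero.mp hs)
      subst h0
      rw [pvRep_nil] at hw
      exact Or.inl hw
    | succ n ih =>
      intro s w hs hw
      cases s with
      | nil => rw [pvRep_nil] at hw; exact Or.inl hw
      | cons c t =>
        rw [pvRep_cons] at hw
        by_cases hp : old.isPrefixOf (c :: t)
        · rw [if_pos hp] at hw
          obtain ⟨nb, new', rfl⟩ : ∃ nb new', new = nb :: new' := by
            cases new with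
            | nil => simp at hh
            | cons nb new' => exact ⟨nb, new', rfl⟩
          have hnb : nb = '[' := by simpa using hh
          cases w with
          | nil => exact Or.inl (List.nil_prefix)
          | cons b w' =>
            have hb : b = nb := (List.cons_prefix_cons.mp hw).1
            exact Or.inr (by simp [hb, hnb])
        · rw [if_neg hp] at hw
          cases w with
          | nil => exact Or.inl (List.nil_prefix)
          | cons b w' =>
            obtain ⟨hb, hw'⟩ := List.cons_prefix_cons.mp hw
            rcases ih t w' (by simpa using Nat.lt_succ_iff.mp (by simpa using hs)) hw' with h1 | h1
            · exact Or.inl (List.cons_prefix_cons.mpr ⟨hb, h1⟩)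
            · exact Or.inr (List.mem_cons_of_mem _ h1)
  intro s w hw
  exact H s.length s w le_rfl hw

-- a prefix untouched by the replacement survives it
lemma pvRep_keep (old new : List Char) :
    ∀ (w s : List Char), w <+: s → (∀ p, p < w.length → ¬ old <+: s.drop p) →
      w <+: pvRep old new s := by
  intro w
  induction w with
  | nil => intro s _ _; exact List.nil_prefix
  | cons a w' ih =>
    intro s hpre hno
    cases s with
    | nil => exact absurd (List.eq_nil_of_prefix_nil hpre) (by simp)
    | cons b t =>
      obtain ⟨hab, hw'⟩ := List.cons_prefix_cons.mp hpre
      rw [pvRep_cons, if_neg (by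
        simp only [List.isPrefixOf_iff_prefix]
        have := hno 0 (by simp)
        simpa using this)]
      refine List.cons_prefix_cons.mpr ⟨hab, ih t hw' (fun p hp => ?_)⟩
      have := hno (p + 1) (by simp; omega)
      simpa using this

-- no key can match at any position inside (or straddling out of) a markdown block
lemma pvMdSafe (m key t : List Char) (p : Nat) (hp : p < m.length)
    (hl : m.getLast? = some ')') (hin : PySem.Chars.isIn key m = false)
    (hcl : ')' ∉ key) : ¬ key <+: (m.drop p ++ t) := by
  intro hkp
  rcases List.prefix_or_prefix_of_prefix hkp (List.prefix_append (m.drop p) t) with h1 | h1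
  · -- key sits inside m: contradiction with hin
    obtain ⟨z, hz⟩ := h1
    have hinf : key <:+: m := ⟨m.take p, z, by
      rw [List.append_assoc, hz, List.take_append_drop]⟩
    rw [PySem.Chars.isIn_eq_false_iff] at hin
    exact hin hinf
  · -- key runs past m's final ')': contradiction with hcl
    have hmem : ')' ∈ m.drop p := by
      have h2 : (m.drop p).getLast? = some ')' := by
        rw [List.getLast?_drop]
        simp [Nat.not_le.mpr hp, hl]
      exact List.mem_of_getLast? h2
    exact hcl (h1.subset hmem)

lemma pvFind?_congr {α : Type} (l : List α) (p q : α → Bool)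
    (h : ∀ x ∈ l, p x = q x) : l.find? p = l.find? q := by
  induction l with
  | nil => rfl
  | cons a l ih =>
    have ha := h a (List.mem_cons_self ..)
    cases hq : q a with
    | true => rw [List.find?_cons_of_pos (ha.trans hq), List.find?_cons_of_pos hq]
    | false =>
      rw [List.find?_cons_of_neg (by simp [ha, hq]), List.find?_cons_of_neg (by simp [hq]),
        ih (fun x hx => h x (List.mem_cons_of_mem _ hx))]

-- a good key k cannot match strictly inside the span of another good key's match
lemma pvNoInner (k w s : List Char) (hkQ : k.head? = some 'Q')
    (hwQ : ∀ i, 1 ≤ i → i < w.length → w[i]? ≠ some 'Q')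
    (hw : w <+: s) (h0 : ¬ k <+: s) :
    ∀ p, p < w.length → ¬ k <+: s.drop p := by
  intro p hp hk
  rcases Nat.eq_zero_or_pos p with hz | hpos
  · subst hz; simp only [List.drop_zero] at hk; exact h0 hk
  · have hsp : s[p]? = some 'Q' := by
      obtain ⟨z, hz⟩ := hk
      have hh : (s.drop p).head? = some 'Q' := by
        rw [← hz]
        cases k with
        | nil => simp at hkQ
        | cons a k' => simpa using (by simpa using hkQ : a = 'Q')
      rwa [List.head?_drop] at hh
    have hwp : w[p]? = some 'Q' := by
      obtain ⟨z, hz⟩ := hw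
      rw [← hz] at hsp
      rwa [List.getElem?_append_left hp] at hsp
    exact hwQ p hpos hp hwp

-- main step: one replace pass before the scan of the remaining table = scan with the pair added
lemma pvStep (k m : List Char) (tbl : List (List Char × List Char))
    (hk : pvGoodKey k = true) (hmh : m.head? = some '[') (hml : m.getLast? = some ')')
    (htbl : ∀ kw ∈ tbl, pvGoodKey kw.1 = true ∧ PySem.Chars.isIn kw.1 m = false) :
    ∀ s, pvBScan tbl (pvRep k m s) = pvBScan ((k, m) :: tbl) s := by
  have H : ∀ (n : Nat) (s : List Char), s.length ≤ n →
      pvBScan tbl (pvRep k m s) = pvBScan ((k, m) :: tbl) s := by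
    intro n
    induction n with
    | zero =>
      intro s hs
      have h0 : s = [] := List.eq_nil_of_length_eq_zero (Nat.le_zero.mp hs)
      subst h0
      rw [pvRep_nil, pvBScan_nil', pvBScan_nil']
    | succ n ih =>
      intro s hs
      cases s with
      | nil => rw [pvRep_nil, pvBScan_nil', pvBScan_nil']
      | cons c t =>
        have htlen : t.length ≤ n := by simpa using Nat.lt_succ_iff.mp (by simpa using hs)
        by_cases hpre : k <+: (c :: t)
        · -- k matches here: both sides emit m and continue after the match
          have hrep : pvRep k m (c :: t) = m ++ pvRep k m (t.drop (k.length - 1)) := by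
            rw [pvRep_cons, if_pos (List.isPrefixOf_iff_prefix.mpr hpre)]
          have hskip : pvBScan tbl (m ++ pvRep k m (t.drop (k.length - 1)))
              = m ++ pvBScan tbl (pvRep k m (t.drop (k.length - 1))) := by
            apply pvBScan_skip
            intro p hp km hkm
            exact pvMdSafe m km.1 _ p hp hml ((htbl km hkm).2)
              (pvGoodKey_noParen (htbl km hkm).1)
          have hlen : (t.drop (k.length - 1)).length ≤ n := by
            simp only [List.length_drop]; omega
          have hfind : ((k, m) :: tbl).find? (fun km => km.1.isPrefixOf (c :: t))
              = some (k, m) :=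
            List.find?_cons_of_pos (by simpa [List.isPrefixOf_iff_prefix] using hpre)
          rw [hrep, hskip, ih _ hlen, pvBScan_cons_some hfind]
        · -- k does not match here
          have hrep : pvRep k m (c :: t) = c :: pvRep k m t := by
            rw [pvRep_cons, if_neg (by simpa [List.isPrefixOf_iff_prefix] using hpre)]
          -- each table key matches the replaced string iff it matches the original
          have hiff : ∀ km' ∈ tbl, (fun km' => km'.1.isPrefixOf (c :: pvRep k m t)) km'
              = (fun km' => km'.1.isPrefixOf (c :: t)) km' := by
            intro km' hkm'
            have hgk := (htbl km' hkm').1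
            by_cases hb : km'.1 <+: (c :: t)
            · have h2 : km'.1 <+: (c :: pvRep k m t) := by
                rw [← hrep]
                exact pvRep_keep k m km'.1 (c :: t) hb
                  (pvNoInner k km'.1 (c :: t) (pvGoodKey_headQ hk)
                    (pvGoodKey_noQ hgk) hb hpre)
              rw [Bool.eq_iff_iff]
              simp [List.isPrefixOf_iff_prefix, hb, h2]
            · have hnb : ¬ km'.1 <+: (c :: pvRep k m t) := by
                intro hcon
                rw [← hrep] at hcon
                rcases pvRep_prefix k m hmh (c :: t) km'.1 hcon with h1 | h1
                · exact hb h1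
                · exact pvGoodKey_noBracket hgk h1
              rw [Bool.eq_iff_iff]
              simp [List.isPrefixOf_iff_prefix, hb, hnb]
          have hfind2 : tbl.find? (fun km' => km'.1.isPrefixOf (c :: pvRep k m t))
              = tbl.find? (fun km' => km'.1.isPrefixOf (c :: t)) :=
            pvFind?_congr tbl _ _ hiff
          have hheadno : ¬ ((k, m).1.isPrefixOf (c :: t) = true) := by
            simp only [List.isPrefixOf_iff_prefix]; exact hpre
          rw [hrep]
          cases hf : tbl.find? (fun km' => km'.1.isPrefixOf (c :: t)) with
          | none =>
            rw [pvBScan_cons_none (hfind2.trans hf),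
              pvBScan_cons_none ((List.find?_cons_of_neg (p := fun km' : List Char × List Char => km'.1.isPrefixOf (c :: t)) hheadno).trans hf),
              ih t htlen]
          | some kw =>
            have hks := List.find?_some hf
            have hmem := List.mem_of_find?_eq_some hf
            have hkw1 : kw.1 <+: (c :: t) := List.isPrefixOf_iff_prefix.mp hks
            have hgkw := (htbl kw hmem).1
            obtain ⟨a, kw', hkweq⟩ : ∃ a kw', kw.1 = a :: kw' := by
              cases hx : kw.1 with
              | nil => exact absurd hx (pvGoodKey_ne_nil hgkw)
              | cons a kw' => exact ⟨a, kw', rfl⟩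
            have hno : ∀ p, p < kw.1.length → ¬ k <+: (c :: t).drop p :=
              pvNoInner k kw.1 (c :: t) (pvGoodKey_headQ hk) (pvGoodKey_noQ hgkw) hkw1 hpre
            have hsplit : kw.1 ++ (c :: t).drop kw.1.length = c :: t :=
              List.prefix_iff_eq_append.mp hkw1
            have hZdef : (c :: t).drop kw.1.length = t.drop (kw.1.length - 1) := by
              rw [hkweq]; simp [List.drop_succ_cons]
            have hrepZ : pvRep k m (kw.1 ++ (c :: t).drop kw.1.length)
                = kw.1 ++ pvRep k m ((c :: t).drop kw.1.length) := by
              apply pvRep_skip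
              intro p hp
              rw [show kw.1.drop p ++ (c :: t).drop kw.1.length
                  = (kw.1 ++ (c :: t).drop kw.1.length).drop p by
                rw [List.drop_append_of_le_length (Nat.le_of_lt hp)], hsplit]
              exact hno p hp
            set X := pvRep k m ((c :: t).drop kw.1.length) with hX
            have htail : pvRep k m t = kw' ++ X := by
              have h1 : pvRep k m (c :: t) = kw.1 ++ X := by
                conv_lhs => rw [← hsplit]
                exact hrepZ
              rw [hrep] at h1
              have hac : a = c := by
                rw [hkweq] at hkw1
                exact (List.cons_prefix_cons.mp hkw1).1
              rw [hkweq, hac, List.cons_append] at h1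
              exact (List.cons.injEq _ _ _ _).mp h1 |>.2
            have hdroptail : (pvRep k m t).drop (kw.1.length - 1) = X := by
              rw [htail, hkweq]
              simp
            have hZlen : ((c :: t).drop kw.1.length).length ≤ n := by
              rw [hZdef]
              simp only [List.length_drop]; omega
            rw [pvBScan_cons_some (hfind2.trans hf),
              pvBScan_cons_some ((List.find?_cons_of_neg (p := fun km' : List Char × List Char => km'.1.isPrefixOf (c :: t)) hheadno).trans hf),
              hdroptail, hX, ← hZdef, ih _ hZlen]
  intro s
  exact H s.length s le_rfl

-- the chain of replaces equals the single scan
lemma pvChain : ∀ (tbl : List (List Char × List Char)), pvGood tbl = true →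
    ∀ s, tbl.foldl (fun acc km => pvRep km.1 km.2 acc) s = pvBScan tbl s := by
  intro tbl
  induction tbl with
  | nil => intro _ s; simp [pvBScan_nil]
  | cons km rest ih =>
    obtain ⟨kk, mm⟩ := km
    intro hg s
    simp only [pvGood, Bool.and_eq_true, Bool.not_eq_true', beq_iff_eq,
      List.all_eq_true] at hg
    obtain ⟨⟨⟨⟨hgk, hh⟩, hl⟩, hall⟩, hrest⟩ := hg
    rw [List.foldl_cons, ih hrest (pvRep kk mm s),
      pvStep kk mm rest hgk hh hl
        (fun kw hkw => ⟨pvGood_mem_key hrest hkw, hall kw hkw⟩) s]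

lemma pvFold_bridge (l : List (List Char × List Char)) :
    ∀ s, (∀ km ∈ l, km.1 ≠ ([] : List Char)) →
      l.foldl (fun acc km => PySem.Chars.replace acc km.1 km.2) s
        = l.foldl (fun acc km => pvRep km.1 km.2 acc) s := by
  induction l with
  | nil => intro s _; rfl
  | cons a l ih =>
    intro s h
    rw [List.foldl_cons, List.foldl_cons,
      pvRep_eq s a.1 a.2 (h a (List.mem_cons_self ..)),
      ih _ (fun km hm => h km (List.mem_cons_of_mem _ hm))]

-- A's computed md table IS B's literal TABLE
lemma pvMd_eq (k v : List Char) :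
    "[".toList ++ k ++ "](".toList ++ v ++ ")".toList
      = '[' :: (k ++ (']' :: '(' :: (v ++ [')']))) := by
  show ['['] ++ k ++ [']', '('] ++ v ++ [')'] = _
  simp

-- A's computed md table IS B's computed TABLE
lemma pvTables_eq :
    pvALinks.map (fun kv => (kv.1, "[".toList ++ kv.1 ++ "](".toList ++ kv.2 ++ ")".toList))
      = pvBTable := by
  have h : pvBLinks = pvALinks := rfl
  unfold pvBTable
  rw [h]
  exact List.map_congr_left (fun kv _ => by rw [pvMd_eq])

set_option maxRecDepth 100000 in
lemma pvGood_bTable : pvGood pvBTable = true := by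
  decide

-- ===== VERDICT (by name: the statement is the Claim_ definition above) =====
theorem addHyperlinks_spec : Claim_equal_addHyperlinks := by
  intro doc _
  unfold Spec_addHyperlinks addHyperlinks addHyperlinks_alt
  show String.ofList (List.foldl (fun acc kv => PySem.Chars.replace acc kv.1 kv.2) doc.toList
      (pvALinks.map (fun kv => (kv.1, "[".toList ++ kv.1 ++ "](".toList ++ kv.2 ++ ")".toList)))) = _
  rw [pvTables_eq, pvFold_bridge _ _ (fun km hm =>
        pvGoodKey_ne_nil (pvGood_mem_key pvGood_bTable hm)),
      pvChain pvBTable pvGood_bTable]
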